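-- pv_equiv track=rewrite | github.com/SIA-IOTechnology/Kittysploit-framework | interfaces/kittyproxy/module_suggester.py | get_suggestions_summary
-- ===== SOURCE A (Python) =====
-- from typing import Dict, List, Set
--
-- def get_suggestions_summary(suggestions: List[Dict]) -> Dict:
--     """Retourne un résumé des suggestions"""
--     if not suggestions:
--         return {
--             'total': 0,
--             'high_priority': 0,
--             'medium_priority': 0,
--             'low_priority': 0,
--         }
--
--     summary = {
--         'total': len(suggestions),
--         'high_priority': len([s for s in suggestions if s['priority'] == 'high']),
--         'medium_priority': len([s for s in suggestions if s['priority'] == 'medium']),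
--         'low_priority': len([s for s in suggestions if s['priority'] == 'low']),
--     }
--
--     return summary
-- ===== SOURCE B (Python) =====
-- def get_suggestions_summary(suggestions):
--     """Retourne un résumé des suggestions"""
--     counts = {}
--     for s in suggestions:
--         p = s['priority']
--         counts[p] = counts.get(p, 0) + 1
--     return {
--         'total': len(suggestions),
--         'high_priority': counts.get('high', 0),
--         'medium_priority': counts.get('medium', 0),
--         'low_priority': counts.get('low', 0),
--     }
-- ===== Notes on version B (the rewrite author's own statement) =====
-- stated objective: faster
-- what changed: Three separate filtering scans (plus an empty-list special case) are replaced by one pass that tallies priorities into a dict, from which the three counts are read off.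
import Mathlib
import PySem

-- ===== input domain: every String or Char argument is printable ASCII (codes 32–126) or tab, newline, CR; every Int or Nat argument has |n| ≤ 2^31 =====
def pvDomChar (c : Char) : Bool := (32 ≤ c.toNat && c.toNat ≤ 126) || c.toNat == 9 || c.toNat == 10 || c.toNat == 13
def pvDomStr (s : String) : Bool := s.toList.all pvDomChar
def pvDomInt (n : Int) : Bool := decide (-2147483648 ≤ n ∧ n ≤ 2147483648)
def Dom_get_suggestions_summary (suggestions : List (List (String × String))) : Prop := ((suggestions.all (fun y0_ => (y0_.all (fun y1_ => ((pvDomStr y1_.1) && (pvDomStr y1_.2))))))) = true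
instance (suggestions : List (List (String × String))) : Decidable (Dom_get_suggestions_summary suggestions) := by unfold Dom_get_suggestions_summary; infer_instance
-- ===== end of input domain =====

-- B replaces A's three filtering scans (and empty-list special case) with one pass tallying
-- priorities into a dict; objective: faster (constant factor, one scan instead of three).


-- s['priority']: first-match lookup in the association list (total form; Pre_ guarantees the key is present)
def pvPriority (s : List (String × String)) : String :=
  ((s.find? (fun p => p.1 == "priority")).map (·.2)).getD ""

-- ===== PORT A =====
def get_suggestions_summary (suggestions : List (List (String × String))) : List (String × Int) :=
  if suggestions = [] then
    [("total", 0), ("high_priority", 0), ("medium_priority", 0), ("low_priority", 0)]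
  else
    [("total", (suggestions.length : Int)),
     ("high_priority", ((suggestions.filter (fun s => pvPriority s == "high")).length : Int)),
     ("medium_priority", ((suggestions.filter (fun s => pvPriority s == "medium")).length : Int)),
     ("low_priority", ((suggestions.filter (fun s => pvPriority s == "low")).length : Int))]

-- ===== PORT B =====
def get_suggestions_summary_alt (suggestions : List (List (String × String))) : List (String × Int) :=
  let counts := suggestions.foldl
    (fun d s => d.insert (pvPriority s) (d.getD (pvPriority s) 0 + 1))
    (PySem.Dict.empty : PySem.Dict String Int)
  [("total", (suggestions.length : Int)),
   ("high_priority", counts.getD "high" 0),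
   ("medium_priority", counts.getD "medium" 0),
   ("low_priority", counts.getD "low" 0)]

-- ===== PRECONDITION & SPEC =====
-- Pre_ excludes inputs where some suggestion lacks the 'priority' key: there the Python A
-- (and B alike) raises KeyError instead of returning a value.
def Pre_get_suggestions_summary (suggestions : List (List (String × String))) : Prop :=
  suggestions.all (fun s => s.any (fun p => p.1 == "priority")) = true
instance (suggestions : List (List (String × String))) : Decidable (Pre_get_suggestions_summary suggestions) := by unfold Pre_get_suggestions_summary; infer_instance

def pvWitness_get_suggestions_summary : (List (List (String × String))) :=
  [[("priority", "high")], [("priority", "low"), ("name", "x")]]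

def Spec_get_suggestions_summary (suggestions : List (List (String × String))) (out : List (String × Int)) : Prop := out = get_suggestions_summary_alt suggestions
instance (suggestions : List (List (String × String))) (out : List (String × Int)) : Decidable (Spec_get_suggestions_summary suggestions out) := by unfold Spec_get_suggestions_summary; infer_instance

-- ===== CLAIM (what is proved, stated in full; the proofs are below) =====
def Claim_equal_get_suggestions_summary : Prop := ∀ (suggestions : List (List (String × String))), Dom_get_suggestions_summary suggestions → Pre_get_suggestions_summary suggestions → Spec_get_suggestions_summary suggestions (get_suggestions_summary suggestions)

-- ===== LEMMAS AND PROOFS =====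

-- B's dict tally read at key k is exactly A's filter count.
theorem pv_counts_eq (l : List (List (String × String))) (k : String) :
    (l.foldl (fun d s => d.insert (pvPriority s) (d.getD (pvPriority s) 0 + 1))
      (PySem.Dict.empty : PySem.Dict String Int)).getD k 0
      = ((l.filter (fun s => pvPriority s == k)).length : Int) := by
  have h : l.foldl (fun d s => d.insert (pvPriority s) (d.getD (pvPriority s) 0 + 1))
      (PySem.Dict.empty : PySem.Dict String Int)
      = (l.map pvPriority).foldl (fun d x => d.insert x (d.getD x 0 + 1)) PySem.Dict.empty := by
    rw [List.foldl_map]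
  rw [h, PySem.Dict.getD_foldl_insert_add_one, PySem.Dict.getD_empty]
  simp [List.count, ← List.countP_eq_length_filter, List.countP_map, Function.comp_def]

-- ===== VERDICT (by name: the statement is the Claim_ definition above) =====
theorem get_suggestions_summary_spec : Claim_equal_get_suggestions_summary := by
  unfold Claim_equal_get_suggestions_summary
  intro suggestions _ _
  unfold Spec_get_suggestions_summary get_suggestions_summary get_suggestions_summary_alt
  by_cases h : suggestions = []
  · subst h; decide
  · simp only [if_neg h, pv_counts_eq]
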